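-- pv_equiv track=rewrite | github.com/AlmaLinux/astra | astra_app/core/templatetags/core_membership_notes.py | _response_snapshot_value_map
-- ===== SOURCE A (Python) =====
-- def _response_snapshot_value_map(snapshot: list[dict[str, str]]) -> tuple[list[str], dict[str, str]]:
--     order: list[str] = []
--     values_by_question: dict[str, str] = {}
--     for row in snapshot:
--         for question, value in row.items():
--             if question not in values_by_question:
--                 order.append(question)
--             values_by_question[question] = value
--     return order, values_by_question
-- ===== SOURCE B (Python) =====
-- def _response_snapshot_value_map(snapshot):
--     pairs = [item for row in snapshot for item in row.items()]
--     order = list(dict.fromkeys(q for q, _ in pairs))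
--     last: dict[str, str] = {}
--     for q, v in reversed(pairs):
--         if q not in last:
--             last[q] = v
--     return order, {q: last[q] for q in order}
-- ===== Notes on version B (the rewrite author's own statement) =====
-- stated objective: alternative
-- what changed: B flattens the snapshot into one pair list, derives the key order by a dedup of the key stream, finds each key's final value by scanning the flattened pairs in REVERSE keeping the first hit, and assembles the result map from the order list - instead of A's single forward pass that maintains order list and overwrite-dict together.
import Mathlib
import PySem

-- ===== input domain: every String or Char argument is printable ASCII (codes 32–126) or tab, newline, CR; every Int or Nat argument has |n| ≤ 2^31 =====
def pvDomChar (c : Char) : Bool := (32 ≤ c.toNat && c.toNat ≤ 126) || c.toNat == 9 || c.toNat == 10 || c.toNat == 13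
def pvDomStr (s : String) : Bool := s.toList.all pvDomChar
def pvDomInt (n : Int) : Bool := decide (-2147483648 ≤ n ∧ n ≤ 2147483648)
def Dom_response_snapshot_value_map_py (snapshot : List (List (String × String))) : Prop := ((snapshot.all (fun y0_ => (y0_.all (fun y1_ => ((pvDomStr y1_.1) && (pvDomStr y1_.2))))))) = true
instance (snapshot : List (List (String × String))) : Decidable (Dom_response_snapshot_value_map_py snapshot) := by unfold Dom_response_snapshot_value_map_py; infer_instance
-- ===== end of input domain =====

-- B flattens the snapshot to one pair list, derives key order by dedup of the key stream,
-- finds each final value by a reversed keep-first scan, and assembles the map from the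
-- order list — a staged decomposition instead of A's single combined forward pass; objective: alternative.


-- ===== PORT A =====
-- order/dict pair threaded through the doubly nested loop, as in A
def response_snapshot_value_map_py (snapshot : List (List (String × String))) : List String × (List (String × String)) :=
  let st : List String × PySem.Dict String String :=
    snapshot.foldl (fun st row =>
      row.foldl (fun (st : List String × PySem.Dict String String) qv =>
        ((if st.2.contains qv.1 then st.1 else st.1 ++ [qv.1]), st.2.insert qv.1 qv.2))
        st)
      ([], PySem.Dict.empty)
  (st.1, st.2.items)

-- ===== PORT B =====
-- pairs = flattened [item for row in snapshot for item in row.items()];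
-- order = list(dict.fromkeys(q for q, _ in pairs)) = PySem.List.dedup of the key stream;
-- last = reversed keep-first scan; final dict comprehension {q: last[q] for q in order}
-- (last[q] is always present for q in order, so the .getD "" fallback never fires).
def response_snapshot_value_map_py_alt (snapshot : List (List (String × String))) : List String × (List (String × String)) :=
  let pairs : List (String × String) := snapshot.flatMap (fun row => row)
  let order : List String := PySem.List.dedup (pairs.map (·.1))
  let last : PySem.Dict String String :=
    pairs.reverse.foldl (fun (d : PySem.Dict String String) qv =>
      if d.contains qv.1 then d else d.insert qv.1 qv.2) PySem.Dict.empty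
  (order, (order.foldl (fun (d : PySem.Dict String String) q =>
      d.insert q ((last.get? q).getD "")) PySem.Dict.empty).items)

-- ===== PRECONDITION & SPEC =====
def Spec_response_snapshot_value_map_py (snapshot : List (List (String × String))) (out : List String × (List (String × String))) : Prop := out = response_snapshot_value_map_py_alt snapshot
instance (snapshot : List (List (String × String))) (out : List String × (List (String × String))) : Decidable (Spec_response_snapshot_value_map_py snapshot out) := by unfold Spec_response_snapshot_value_map_py; infer_instance

-- ===== CLAIM (what is proved, stated in full; the proofs are below) =====
def Claim_equal_response_snapshot_value_map_py : Prop := ∀ (snapshot : List (List (String × String))), Dom_response_snapshot_value_map_py snapshot → Spec_response_snapshot_value_map_py snapshot (response_snapshot_value_map_py snapshot)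

-- ===== LEMMAS AND PROOFS =====

-- A's inner loop keeps the invariant "order list = keys of the dict".
theorem pv_inner (row : List (String × String)) (d : PySem.Dict String String) :
    row.foldl (fun (st : List String × PySem.Dict String String) qv =>
        ((if st.2.contains qv.1 then st.1 else st.1 ++ [qv.1]), st.2.insert qv.1 qv.2))
      (d.keys, d)
    = ((d.update row).keys, d.update row) := by
  induction row generalizing d with
  | nil => rfl
  | cons qv rest ih =>
    show rest.foldl _ ((if d.contains qv.1 then d.keys else d.keys ++ [qv.1]), d.insert qv.1 qv.2) = _
    have hkeys : (if d.contains qv.1 then d.keys else d.keys ++ [qv.1]) = (d.insert qv.1 qv.2).keys := by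
      by_cases h : d.contains qv.1 = true
      · rw [if_pos h, PySem.Dict.keys_insert_of_contains d qv.2 h]
      · rw [if_neg h, PySem.Dict.keys_insert_of_not_contains d qv.2 (by simpa using h)]
    rw [hkeys, ih]
    rfl

theorem pv_outer (snapshot : List (List (String × String))) (d : PySem.Dict String String) :
    snapshot.foldl (fun st row =>
      row.foldl (fun (st : List String × PySem.Dict String String) qv =>
        ((if st.2.contains qv.1 then st.1 else st.1 ++ [qv.1]), st.2.insert qv.1 qv.2))
        st)
      (d.keys, d)
    = ((snapshot.foldl (fun d row => d.update row) d).keys,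
       snapshot.foldl (fun d row => d.update row) d) := by
  induction snapshot generalizing d with
  | nil => rfl
  | cons row rest ih =>
    simp only [List.foldl_cons, pv_inner]
    exact ih (d.update row)

-- the nested update-fold equals the insert-fold over the flattened pair list
theorem pv_flatten (snapshot : List (List (String × String))) (d : PySem.Dict String String) :
    snapshot.foldl (fun d row => d.update row) d
    = (snapshot.flatMap (fun row => row)).foldl (fun d p => d.insert p.1 p.2) d := by
  induction snapshot generalizing d with
  | nil => rfl
  | cons row rest ih =>
    simp only [List.foldl_cons, List.flatMap_cons, List.foldl_append]
    exact ih (d.update row)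

-- forward insert-fold lookup: last value of q in l, falling back to the start dict
theorem pv_fwd (q : String) (l : List (String × String)) (d : PySem.Dict String String) :
    (l.foldl (fun d p => d.insert p.1 p.2) d).get? q
    = ((l.foldl (fun d p => d.insert p.1 p.2) PySem.Dict.empty).get? q).or (d.get? q) := by
  induction l generalizing d with
  | nil => simp [PySem.Dict.get?_empty]
  | cons p rest ih =>
    simp only [List.foldl_cons]
    rw [ih (d.insert p.1 p.2), ih (PySem.Dict.empty.insert p.1 p.2)]
    rcases h : (rest.foldl (fun d p => d.insert p.1 p.2) PySem.Dict.empty).get? q with _ | v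
    · simp only [h, Option.none_or, PySem.Dict.get?_insert, PySem.Dict.get?_empty]
      split_ifs <;> simp
    · simp [h]

-- the reversed keep-first scan has the same lookups as the forward insert-fold
theorem pv_rev (l : List (String × String)) : ∀ q : String,
    (l.reverse.foldl (fun (d : PySem.Dict String String) qv =>
        if d.contains qv.1 then d else d.insert qv.1 qv.2) PySem.Dict.empty).get? q
    = (l.foldl (fun d p => d.insert p.1 p.2) PySem.Dict.empty).get? q := by
  induction l with
  | nil => intro q; rfl
  | cons p rest ih =>
    intro q
    simp only [List.reverse_cons, List.foldl_append, List.foldl_cons, List.foldl_nil]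
    rw [pv_fwd q rest (PySem.Dict.empty.insert p.1 p.2)]
    set d := rest.reverse.foldl (fun (d : PySem.Dict String String) qv =>
        if d.contains qv.1 then d else d.insert qv.1 qv.2) PySem.Dict.empty with hd
    have hcont : d.contains p.1
        = ((rest.foldl (fun d p => d.insert p.1 p.2) PySem.Dict.empty).get? p.1).isSome := by
      rw [PySem.Dict.contains_eq_isSome_get?, ih p.1]
    by_cases hc : d.contains p.1 = true
    · rw [if_pos hc, ih q]
      rcases h : (rest.foldl (fun d p => d.insert p.1 p.2) PySem.Dict.empty).get? q with _ | v
      · by_cases hq : q = p.1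
        · exfalso; rw [hcont, ← hq, h] at hc; simp at hc
        · simp [PySem.Dict.get?_insert, hq, PySem.Dict.get?_empty]
      · simp [h]
    · rw [if_neg hc]
      have hnone : (rest.foldl (fun d p => d.insert p.1 p.2) PySem.Dict.empty).get? p.1 = none := by
        rcases hx : (rest.foldl (fun d p => d.insert p.1 p.2) PySem.Dict.empty).get? p.1 with _ | v
        · exact hx
        · rw [hcont, hx] at hc; simp at hc
      rw [PySem.Dict.get?_insert]
      by_cases hq : q = p.1
      · subst hq; rw [if_pos rfl, hnone, Option.none_or, PySem.Dict.get?_insert, if_pos rfl]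
      · rw [if_neg hq, ih q]
        rcases h : (rest.foldl (fun d p => d.insert p.1 p.2) PySem.Dict.empty).get? q with _ | v
        · simp [h, PySem.Dict.get?_insert, hq, PySem.Dict.get?_empty]
        · simp [h]

-- ===== VERDICT (by name: the statement is the Claim_ definition above) =====
theorem response_snapshot_value_map_py_spec : Claim_equal_response_snapshot_value_map_py := by
  intro snapshot _
  show response_snapshot_value_map_py snapshot = response_snapshot_value_map_py_alt snapshot
  have h := pv_outer snapshot PySem.Dict.empty
  simp only [show (PySem.Dict.empty : PySem.Dict String String).keys = [] from rfl] at h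
  set pairs := snapshot.flatMap (fun row => row) with hp
  set merged := snapshot.foldl (fun d row => d.update row) PySem.Dict.empty with hm
  have hA : response_snapshot_value_map_py snapshot = (merged.keys, merged.items) := by
    unfold response_snapshot_value_map_py
    rw [h]
  have hB : response_snapshot_value_map_py_alt snapshot
      = (PySem.List.dedup (pairs.map (·.1)),
         ((PySem.List.dedup (pairs.map (·.1))).foldl (fun (d : PySem.Dict String String) q =>
            d.insert q (((pairs.reverse.foldl (fun (d : PySem.Dict String String) qv =>
              if d.contains qv.1 then d else d.insert qv.1 qv.2) PySem.Dict.empty).get? q).getD ""))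
           PySem.Dict.empty).items) := rfl
  rw [hA, hB]
  have hflat : merged = pairs.foldl (fun d p => d.insert p.1 p.2) PySem.Dict.empty :=
    pv_flatten snapshot PySem.Dict.empty
  have hnodup : merged.keys.Nodup := by
    rw [hflat]
    exact PySem.Dict.nodup_keys_foldl_insert_key pairs (fun p => p.1) (fun _ p => p.2)
      PySem.Dict.empty (by simp)
  have hkeys : merged.keys = PySem.List.dedup (pairs.map (·.1)) := by
    rw [hflat, PySem.Dict.keys_foldl_insert_key]
    simp [PySem.Set.update, PySem.List.dedup_eq_ofList, PySem.Set.ofList, PySem.Dict.keys_empty]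
  have hlook : ∀ q : String, ((pairs.reverse.foldl (fun (d : PySem.Dict String String) qv =>
        if d.contains qv.1 then d else d.insert qv.1 qv.2) PySem.Dict.empty).get? q).getD ""
      = merged.getD q "" := by
    intro q
    rw [pv_rev pairs q, ← hflat, PySem.Dict.getD_eq_get?_getD]
  have hfun : (fun (d : PySem.Dict String String) q =>
        d.insert q (((pairs.reverse.foldl (fun (d : PySem.Dict String String) qv =>
          if d.contains qv.1 then d else d.insert qv.1 qv.2) PySem.Dict.empty).get? q).getD ""))
      = fun (d : PySem.Dict String String) q => d.insert q (merged.getD q "") := by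
    funext d q
    rw [hlook q]
  rw [hfun, ← hkeys]
  refine Prod.ext rfl ?_
  show merged.items = (merged.keys.foldl (fun (d : PySem.Dict String String) q =>
      d.insert q (merged.getD q "")) PySem.Dict.empty).items
  have hfresh := PySem.Dict.items_foldl_insert_fresh (l := merged.keys) (d := PySem.Dict.empty)
    (k := fun q => q) (v := fun q => merged.getD q "")
    (by intro a _; exact PySem.Dict.contains_empty a) (by simpa using hnodup)
  simp only [show (PySem.Dict.empty : PySem.Dict String String).items = [] from rfl,
    List.nil_append] at hfresh
  rw [hfresh]
  simpa using PySem.Dict.items_eq_map_keys merged hnodup ""
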